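-- pv_equiv track=rewrite | github.com/MinChul-Son/for-Coding-Test | programmers/exhaustive_search_level1.py | solution
-- ===== SOURCE A (Python) =====
-- def solution(answers):
--     answer = []
--     student1 = [1,2,3,4,5] *8
--     student2 = [2,1,2,3,2,4,2,5] * 5
--     student3 = [3,3,1,1,2,2,4,4,5,5] * 4
--     rank_list = [0,0,0]
--     count = 0
--     max_count = 0
--     while count<len(answers):
--         if count==len(student1): #각 학생별 규칙이 모지랄 때
--             student1 = student1 *2
--             student2 = student2 *2
--             student3 = student3 *2
--         if answers[count] == student1[count]:
--             rank_list[0] += 1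
--         if answers[count] == student2[count]:
--             rank_list[1] += 1
--         if answers[count] == student3[count]:
--             rank_list[2] += 1
--         count += 1
--
--     max_count = max(rank_list)
--     for i in range(len(rank_list)):
--         if rank_list[i] == max_count:
--             answer.append(i+1)
--
--     return answer
-- ===== SOURCE B (Python) =====
-- def solution(answers):
--     # One pass builds a histogram keyed by (index mod 40, answer); 40 = lcm of the
--     # three pattern lengths, so each student's score is then a fixed 40-term lookup sum.
--     freq = {}
--     for i, a in enumerate(answers):
--         key = (i % 40, a)
--         freq[key] = freq.get(key, 0) + 1
--     patterns = [[1, 2, 3, 4, 5], [2, 1, 2, 3, 2, 4, 2, 5], [3, 3, 1, 1, 2, 2, 4, 4, 5, 5]]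
--     scores = [sum(freq.get((j, p[j % len(p)]), 0) for j in range(40)) for p in patterns]
--     best = max(scores)
--     return [i + 1 for i in range(3) if scores[i] == best]
-- ===== Notes on version B (the rewrite author's own statement) =====
-- stated objective: alternative
-- what changed: Replaced the interleaved per-element comparison loop (which doubles three materialized pattern lists in place) with a residue-class histogram: one pass builds a dict counting (index mod 40, answer) pairs, and each student's score becomes a fixed 40-term dictionary-lookup sum, so the per-student comparison scan over the answers disappears.
import Mathlib
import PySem

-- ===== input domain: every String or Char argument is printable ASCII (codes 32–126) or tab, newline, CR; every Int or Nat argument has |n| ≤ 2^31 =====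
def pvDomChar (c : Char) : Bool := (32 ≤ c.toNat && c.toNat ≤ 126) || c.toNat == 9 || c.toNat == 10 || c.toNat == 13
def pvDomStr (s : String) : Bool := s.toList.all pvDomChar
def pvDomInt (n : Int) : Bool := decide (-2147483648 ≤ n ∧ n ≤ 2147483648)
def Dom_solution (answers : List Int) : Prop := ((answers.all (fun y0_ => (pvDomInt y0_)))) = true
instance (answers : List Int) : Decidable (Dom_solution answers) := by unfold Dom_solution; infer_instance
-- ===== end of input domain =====

-- B replaces A's interleaved per-element comparison loop (with in-place doubling of three
-- materialized pattern lists) by a residue-class histogram keyed by (index mod 40, answer);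
-- each score is then a fixed 40-term lookup sum (alternative decomposition, same cost).

-- ===== PORT A =====
-- Python list repetition  l * n
def pyRep (l : List Int) : Nat → List Int
  | 0 => []
  | n + 1 => l ++ pyRep l n

-- the while-loop of A: state (student1, student2, student3, rank_list, count)
def loopA (answers s1 s2 s3 : List Int) (r1 r2 r3 : Int) (count : Nat) : Int × Int × Int :=
  if _h : count < answers.length then
    -- "if count == len(student1): double all three"
    let s1' := if count = s1.length then pyRep s1 2 else s1
    let s2' := if count = s1.length then pyRep s2 2 else s2
    let s3' := if count = s1.length then pyRep s3 2 else s3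
    -- answers[count] and studentK[count]: always in range on reachable states,
    -- ported with getD (exact there)
    loopA answers s1' s2' s3'
      (if answers.getD count 0 = s1'.getD count 0 then r1 + 1 else r1)
      (if answers.getD count 0 = s2'.getD count 0 then r2 + 1 else r2)
      (if answers.getD count 0 = s3'.getD count 0 then r3 + 1 else r3)
      (count + 1)
  else (r1, r2, r3)
termination_by answers.length - count

def solution (answers : List Int) : List Int :=
  let r := loopA answers (pyRep [1,2,3,4,5] 8) (pyRep [2,1,2,3,2,4,2,5] 5)
      (pyRep [3,3,1,1,2,2,4,4,5,5] 4) 0 0 0 0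
  let rl := [r.1, r.2.1, r.2.2]
  let m := (PySem.List.max? rl (fun x => x)).getD 0   -- max(rank_list); rl nonempty
  (PySem.List.pyRange 0 3 1).foldl
    (fun acc i => if PySem.List.pyGetD rl i 0 = m then acc ++ [i + 1] else acc) []

-- ===== PORT B =====
-- the histogram loop: freq[(i % 40, a)] = freq.get((i % 40, a), 0) + 1
def buildFreq (answers : List Int) : PySem.Dict (Int × Int) Int :=
  (PySem.List.enumerate answers 0).foldl
    (fun d ia => d.insert (PySem.Int.mod ia.1 40, ia.2)
        (d.getD (PySem.Int.mod ia.1 40, ia.2) 0 + 1))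
    PySem.Dict.empty

-- sum(freq.get((j, p[j % len(p)]), 0) for j in range(40))
def scoreB (freq : PySem.Dict (Int × Int) Int) (p : List Int) : Int :=
  ((PySem.List.pyRange 0 40 1).map
    (fun j => freq.getD (j, PySem.List.pyGetD p (PySem.Int.mod j (p.length : Int)) 0) 0)).sum

def solution_alt (answers : List Int) : List Int :=
  let freq := buildFreq answers
  let patterns : List (List Int) := [[1,2,3,4,5], [2,1,2,3,2,4,2,5], [3,3,1,1,2,2,4,4,5,5]]
  let scores := patterns.map (scoreB freq)
  let best := (PySem.List.max? scores (fun x => x)).getD 0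
  (PySem.List.pyRange 0 3 1).foldl
    (fun acc i => if PySem.List.pyGetD scores i 0 = best then acc ++ [i + 1] else acc) []

-- ===== PRECONDITION & SPEC =====
def Spec_solution (answers : List Int) (out : List Int) : Prop := out = solution_alt answers
instance (answers : List Int) (out : List Int) : Decidable (Spec_solution answers out) := by unfold Spec_solution; infer_instance

-- ===== CLAIM (what is proved, stated in full; the proofs are below) =====
def Claim_equal_solution : Prop := ∀ (answers : List Int), Dom_solution answers → Spec_solution answers (solution answers)

-- ===== LEMMAS AND PROOFS =====

-- remaining score from position `count` against a cyclically repeated pattern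
def cnt (answers p : List Int) (count : Nat) : Int :=
  if _h : count < answers.length then
    (if answers.getD count 0 = p.getD (count % p.length) 0 then 1 else 0)
      + cnt answers p (count + 1)
  else 0
termination_by answers.length - count

theorem pyRep_add (l : List Int) (a b : Nat) : pyRep l (a + b) = pyRep l a ++ pyRep l b := by
  induction a with
  | zero => simp [pyRep]
  | succ n ih => rw [Nat.succ_add]; simp [pyRep, ih]

theorem length_pyRep (l : List Int) (k : Nat) : (pyRep l k).length = k * l.length := by
  induction k with
  | zero => simp [pyRep]
  | succ n ih => simp [pyRep, ih, Nat.succ_mul]; ring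

theorem pyRep_two (l : List Int) (k : Nat) : pyRep (pyRep l k) 2 = pyRep l (2 * k) := by
  have h2 : (2 : Nat) = 1 + 1 := rfl
  have hk : 2 * k = k + k := by ring
  rw [h2, hk, pyRep_add, pyRep_add]
  simp [pyRep]

theorem getD_pyRep (l : List Int) (k i : Nat) (d : Int) (h : i < k * l.length) :
    (pyRep l k).getD i d = l.getD (i % l.length) d := by
  induction k generalizing i with
  | zero => simp at h
  | succ n ih =>
    rw [pyRep]
    by_cases hi : i < l.length
    · rw [List.getD_eq_getElem?_getD, List.getElem?_append_left hi,
        Nat.mod_eq_of_lt hi, ← List.getD_eq_getElem?_getD]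
    · replace hi : l.length ≤ i := by omega
      have hl : 0 < l.length := by
        rcases Nat.eq_zero_or_pos l.length with h0 | h0
        · simp [h0] at h
        · exact h0
      rw [List.getD_eq_getElem?_getD, List.getElem?_append_right hi,
        ← List.getD_eq_getElem?_getD, ih (i - l.length) (by rw [Nat.succ_mul] at h; omega)]
      congr 1
      conv_rhs => rw [← Nat.sub_add_cancel hi]
      rw [Nat.add_mod_right]

theorem cnt_stop (answers p : List Int) (count : Nat) (h : ¬ count < answers.length) :
    cnt answers p count = 0 := by
  rw [cnt]; simp [h]

theorem cnt_step (answers p : List Int) (count : Nat) (h : count < answers.length) :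
    cnt answers p count =
      (if answers.getD count 0 = p.getD (count % p.length) 0 then 1 else 0)
        + cnt answers p (count + 1) := by
  rw [cnt]; simp [h]

-- A's loop computes, from any reachable state, the three remaining cyclic scores.
theorem loopA_eq (answers : List Int) :
    ∀ fuel count j r1 r2 r3, answers.length - count ≤ fuel → count ≤ 40 * 2 ^ j →
    loopA answers (pyRep [1,2,3,4,5] (8 * 2 ^ j)) (pyRep [2,1,2,3,2,4,2,5] (5 * 2 ^ j))
        (pyRep [3,3,1,1,2,2,4,4,5,5] (4 * 2 ^ j)) r1 r2 r3 count
      = (r1 + cnt answers [1,2,3,4,5] count,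
         r2 + cnt answers [2,1,2,3,2,4,2,5] count,
         r3 + cnt answers [3,3,1,1,2,2,4,4,5,5] count) := by
  intro fuel
  induction fuel with
  | zero =>
    intro count j r1 r2 r3 hf _
    have h0 : ¬ count < answers.length := by omega
    rw [loopA]
    simp only [dif_neg h0, cnt_stop _ _ _ h0]
    simp
  | succ n ih =>
    intro count j r1 r2 r3 hf hc
    by_cases hlt : count < answers.length
    · rw [loopA]
      simp only [dif_pos hlt]
      have hL1 : (pyRep [1,2,3,4,5] (8 * 2 ^ j)).length = 40 * 2 ^ j := by
        rw [length_pyRep]; simp; ring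
      by_cases heq : count = 40 * 2 ^ j
      · -- doubling step: all three lists become the (j+1)-stage repeats
        simp only [hL1, if_pos heq, pyRep_two]
        have e1 : 2 * (8 * 2 ^ j) = 8 * 2 ^ (j + 1) := by ring
        have e2 : 2 * (5 * 2 ^ j) = 5 * 2 ^ (j + 1) := by ring
        have e3 : 2 * (4 * 2 ^ j) = 4 * 2 ^ (j + 1) := by ring
        rw [e1, e2, e3]
        have hcj : count < 40 * 2 ^ (j + 1) := by
          have : 2 ^ j < 2 ^ (j + 1) := Nat.pow_lt_pow_right (by norm_num) (Nat.lt_succ_self j)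
          omega
        have hb1 : count < 8 * 2 ^ (j + 1) * 5 := by
          have : 8 * 2 ^ (j + 1) * 5 = 40 * 2 ^ (j + 1) := by ring
          omega
        have hb2 : count < 5 * 2 ^ (j + 1) * 8 := by
          have : 5 * 2 ^ (j + 1) * 8 = 40 * 2 ^ (j + 1) := by ring
          omega
        have hb3 : count < 4 * 2 ^ (j + 1) * 10 := by
          have : 4 * 2 ^ (j + 1) * 10 = 40 * 2 ^ (j + 1) := by ring
          omega
        rw [getD_pyRep _ _ _ _ (by simpa using hb1),
            getD_pyRep _ _ _ _ (by simpa using hb2),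
            getD_pyRep _ _ _ _ (by simpa using hb3),
            ih (count + 1) (j + 1) _ _ _ (by omega) (by omega),
            cnt_step answers [1,2,3,4,5] count hlt,
            cnt_step answers [2,1,2,3,2,4,2,5] count hlt,
            cnt_step answers [3,3,1,1,2,2,4,4,5,5] count hlt]
        simp only [Prod.mk.injEq]
        refine ⟨?_, ?_, ?_⟩ <;> split <;> ring
      · have hclt : count < 40 * 2 ^ j := by omega
        simp only [hL1, if_neg heq]
        have hb1 : count < 8 * 2 ^ j * 5 := by
          have : 8 * 2 ^ j * 5 = 40 * 2 ^ j := by ring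
          omega
        have hb2 : count < 5 * 2 ^ j * 8 := by
          have : 5 * 2 ^ j * 8 = 40 * 2 ^ j := by ring
          omega
        have hb3 : count < 4 * 2 ^ j * 10 := by
          have : 4 * 2 ^ j * 10 = 40 * 2 ^ j := by ring
          omega
        rw [getD_pyRep _ _ _ _ (by simpa using hb1),
            getD_pyRep _ _ _ _ (by simpa using hb2),
            getD_pyRep _ _ _ _ (by simpa using hb3),
            ih (count + 1) j _ _ _ (by omega) (by omega),
            cnt_step answers [1,2,3,4,5] count hlt,
            cnt_step answers [2,1,2,3,2,4,2,5] count hlt,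
            cnt_step answers [3,3,1,1,2,2,4,4,5,5] count hlt]
        simp only [Prod.mk.injEq]
        refine ⟨?_, ?_, ?_⟩ <;> split <;> ring
    · rw [loopA]
      simp only [dif_neg hlt, cnt_stop _ _ _ hlt]
      simp

-- a get-or-0-then-insert counting loop over keys (key x) is a count on the mapped list
theorem getD_foldl_insert_key {α κ : Type} [BEq κ] [LawfulBEq κ] [DecidableEq κ]
    (l : List α) (key : α → κ) (d : PySem.Dict κ Int) (v : κ) :
    (l.foldl (fun d x => d.insert (key x) (d.getD (key x) 0 + 1)) d).getD v 0
      = d.getD v 0 + ((l.map key).count v : Int) := by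
  induction l generalizing d with
  | nil => simp
  | cons x l ih =>
    rw [List.foldl_cons, ih, PySem.Dict.getD_insert, List.map_cons, List.count_cons]
    by_cases hv : v = key x
    · subst hv; simp
      ring
    · rw [if_neg hv, if_neg (by simp only [beq_iff_eq]; exact fun h => hv h.symm)]
      simp

-- Σ_{j ∈ range(a, a+n)} [x = (j, f j)] = [a ≤ x₁ < a+n ∧ x₂ = f x₁]
theorem sum_ind (x : Int × Int) (f : Int → Int) :
    ∀ (n : Nat) (a : Int),
    ((PySem.List.pyRange a (a + n) 1).map (fun j => if x = (j, f j) then (1 : Int) else 0)).sum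
      = if a ≤ x.1 ∧ x.1 < a + n ∧ x.2 = f x.1 then 1 else 0 := by
  intro n
  induction n with
  | zero =>
    intro a
    rw [PySem.List.pyRange_one_eq_nil (by omega)]
    simp only [List.map_nil, List.sum_nil]
    rw [if_neg (by omega)]
  | succ n ih =>
    intro a
    rw [PySem.List.pyRange_one_cons (by omega : a < a + (n + 1 : Nat))]
    rw [List.map_cons, List.sum_cons]
    have : (a : Int) + (n + 1 : Nat) = (a + 1) + (n : Nat) := by push_cast; ring
    rw [this, ih (a + 1)]
    obtain ⟨x1, x2⟩ := x
    simp only [Prod.mk.injEq]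
    by_cases hx : x1 = a
    · subst hx
      split_ifs <;> omega
    · rw [if_neg (by exact fun h => hx h.1)]
      split_ifs <;> omega

-- Σ_{j ∈ range(a, a+n)} M.count (j, f j) = countP over M of the matching predicate
theorem sum_count (f : Int → Int) (M : List (Int × Int)) :
    ∀ (n : Nat) (a b : Int), b = a + n →
    ((PySem.List.pyRange a b 1).map (fun j => ((M.count (j, f j) : Nat) : Int))).sum
      = (M.countP (fun x => decide (a ≤ x.1 ∧ x.1 < b ∧ x.2 = f x.1)) : Int) := by
  induction M with
  | nil => intro n a b hb; simp
  | cons y M ih =>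
    intro n a b hb
    subst hb
    have hsplit :
        (fun j => (((y :: M).count (j, f j) : Nat) : Int))
          = fun j => ((M.count (j, f j) : Nat) : Int)
              + (if (y.1, y.2) = (j, f j) then (1 : Int) else 0) := by
      funext j
      rw [List.count_cons]
      push_cast
      congr 1
      by_cases h : y = (j, f j)
      · rw [if_pos (by simpa using h), if_pos (by rw [← h])]
      · rw [if_neg (by simpa using h), if_neg (fun hc => h (by rw [← hc]))]
    rw [hsplit, PySem.List.sum_map_add_int, ih n a (a + n) rfl, sum_ind (y.1, y.2) f n a,
      List.countP_cons]
    simp only [decide_eq_true_eq]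
    split_ifs <;> push_cast <;> ring
  -- (the `ih` is over M with n, a universally quantified)

-- the histogram lookup is a count on the (index mod 40, answer) list
theorem buildFreq_getD (answers : List Int) (v : Int × Int) :
    (buildFreq answers).getD v 0
      = (((PySem.List.enumerate answers 0).map
          (fun ia => (PySem.Int.mod ia.1 40, ia.2))).count v : Int) := by
  rw [buildFreq, getD_foldl_insert_key]
  simp

-- A's tail score `cnt` from `count` as a 0/1 sum over the enumerated suffix
theorem cnt_eq_enum (p answers : List Int) :
    ∀ fuel count, answers.length - count ≤ fuel →
    cnt answers p count =
      ((PySem.List.enumerate (answers.drop count) (count : Int)).map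
        (fun ia => if ia.2 = PySem.List.pyGetD p (PySem.Int.mod ia.1 (p.length : Int)) 0
                   then (1 : Int) else 0)).sum := by
  intro fuel
  induction fuel with
  | zero =>
    intro count hf
    rw [cnt]
    simp only [dif_neg (by omega : ¬ count < answers.length)]
    rw [List.drop_eq_nil_of_le (by omega)]
    simp [PySem.List.enumerate]
  | succ n ih =>
    intro count hf
    by_cases hlt : count < answers.length
    · rw [cnt]
      simp only [dif_pos hlt]
      have hd : answers.drop count = answers[count] :: answers.drop (count + 1) :=
        List.drop_eq_getElem_cons hlt
      rw [hd, PySem.List.enumerate_cons, List.map_cons, List.sum_cons]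
      have hmod : PySem.Int.mod (count : Int) (p.length : Int) = ((count % p.length : Nat) : Int) :=
        PySem.Int.mod_natCast count p.length
      rw [hmod, PySem.List.pyGetD_natCast]
      have : ((count : Int) + 1) = ((count + 1 : Nat) : Int) := by push_cast; ring
      rw [this, ← ih (count + 1) (by omega)]
      have hg : answers.getD count 0 = answers[count] := List.getD_eq_getElem answers 0 hlt
      rw [hg]
    · rw [cnt]
      simp only [dif_neg hlt]
      rw [List.drop_eq_nil_of_le (by omega)]
      simp [PySem.List.enumerate]

-- B's 40-term lookup sum equals A's cyclic score, for a pattern whose length divides 40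
theorem scoreB_eq (answers p : List Int) (hlen : 0 < p.length)
    (hdvd : (p.length : Int) ∣ 40) :
    scoreB (buildFreq answers) p = cnt answers p 0 := by
  have hf : (fun j => (buildFreq answers).getD
        (j, PySem.List.pyGetD p (PySem.Int.mod j (p.length : Int)) 0) 0)
      = fun j => ((((PySem.List.enumerate answers 0).map
          (fun ia => (PySem.Int.mod ia.1 40, ia.2))).count
            (j, PySem.List.pyGetD p (PySem.Int.mod j (p.length : Int)) 0) : Nat) : Int) := by
    funext j
    exact buildFreq_getD answers _
  rw [scoreB, hf]
  rw [sum_count (fun j => PySem.List.pyGetD p (PySem.Int.mod j (p.length : Int)) 0)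
      ((PySem.List.enumerate answers 0).map (fun ia => (PySem.Int.mod ia.1 40, ia.2))) 40 0 40
      (by norm_num),
    List.countP_map]
  have hpt : ∀ ia : Int × Int,
      ((fun x : Int × Int => decide ((0:Int) ≤ x.1 ∧ x.1 < 40 ∧
          x.2 = PySem.List.pyGetD p (PySem.Int.mod x.1 (p.length : Int)) 0)) ∘
        (fun ia : Int × Int => (PySem.Int.mod ia.1 40, ia.2))) ia
      = decide (ia.2 = PySem.List.pyGetD p (PySem.Int.mod ia.1 (p.length : Int)) 0) := by
    intro ia
    have h1 : (0:Int) ≤ PySem.Int.mod ia.1 40 := PySem.Int.mod_nonneg _ (by norm_num)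
    have h2 : PySem.Int.mod ia.1 40 < 40 := PySem.Int.mod_lt _ (by norm_num)
    have h3 : PySem.Int.mod (PySem.Int.mod ia.1 40) (p.length : Int)
        = PySem.Int.mod ia.1 (p.length : Int) := by
      rw [PySem.Int.mod_eq_emod_of_pos (by norm_num : (0:Int) < 40),
          PySem.Int.mod_eq_emod_of_pos (by exact_mod_cast hlen),
          PySem.Int.mod_eq_emod_of_pos (by exact_mod_cast hlen)]
      exact Int.emod_emod_of_dvd ia.1 hdvd
    simp only [Function.comp_apply, h3]
    simp only [decide_eq_decide]

    constructor
    · exact fun h => h.2.2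
    · intro h
      exact ⟨h1, by omega, h⟩
  rw [List.countP_congr (fun x _ => by rw [hpt x])]
  -- countP over enumerate = the 0/1 sum = cnt
  rw [← PySem.List.sum_map_ite_one_zero]
  rw [cnt_eq_enum p answers answers.length 0 (by omega)]
  simp

-- ===== VERDICT (by name: the statement is the Claim_ definition above) =====
theorem solution_spec : Claim_equal_solution := by
  intro answers _
  show solution answers = solution_alt answers
  rw [solution, solution_alt]
  have h := loopA_eq answers answers.length 0 0 0 0 0 (by omega) (by norm_num)
  norm_num at h
  rw [h]
  simp only [List.map_cons, List.map_nil,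
    scoreB_eq answers [1,2,3,4,5] (by norm_num) (by norm_num),
    scoreB_eq answers [2,1,2,3,2,4,2,5] (by norm_num) (by norm_num),
    scoreB_eq answers [3,3,1,1,2,2,4,4,5,5] (by norm_num) (by norm_num)]
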